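-- pv_equiv track=rewrite | github.com/schedutron/CPAP | Chap3/header_analysis.py | check_spam
-- ===== SOURCE A (Python) =====
-- def check_spam(msg_word_list):
--     for spam_word in spam_word_list:
--         count = 0
--         for word in msg_word_list:
--             if word == spam_word:
--                 count += 1
--                 if count == 3:
--                     return True
--     return False
--
-- spam_word_list = ['lol', 'joke', 'lottery', 'credit', 'approval', 'bonanza']
-- ===== SOURCE B (Python) =====
-- def check_spam(msg_word_list):
--     counts = {}
--     for word in msg_word_list:
--         counts[word] = counts.get(word, 0) + 1
--     return any(counts.get(w, 0) >= 3 for w in spam_word_list)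
--
-- spam_word_list = ['lol', 'joke', 'lottery', 'credit', 'approval', 'bonanza']
-- ===== Notes on version B (the rewrite author's own statement) =====
-- stated objective: idiomatic
-- what changed: One counting pass builds a word-frequency dict, then a flat lookup over the six spam words replaces six separate scans of the message with early-exit counters.
import Mathlib
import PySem

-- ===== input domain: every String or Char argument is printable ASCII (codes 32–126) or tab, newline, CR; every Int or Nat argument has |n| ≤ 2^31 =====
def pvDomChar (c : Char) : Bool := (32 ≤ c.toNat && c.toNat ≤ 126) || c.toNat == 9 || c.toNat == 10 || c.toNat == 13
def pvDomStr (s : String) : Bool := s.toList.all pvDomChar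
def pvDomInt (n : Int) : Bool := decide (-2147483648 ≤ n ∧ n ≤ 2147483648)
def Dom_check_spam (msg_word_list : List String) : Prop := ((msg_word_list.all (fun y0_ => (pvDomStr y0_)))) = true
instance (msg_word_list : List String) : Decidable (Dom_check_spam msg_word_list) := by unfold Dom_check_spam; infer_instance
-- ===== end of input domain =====

-- ===== PORT A =====
-- B replaces per-spam-word rescans of the message with one counting pass plus lookups (idiomatic).
def spam_word_list : List String := ["lol", "joke", "lottery", "credit", "approval", "bonanza"]

-- inner loop: 'for word in msg_word_list: if word == spam_word: count += 1; if count == 3: return True'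
def checkSpamInner (spam_word : String) (msg : List String) (count : Int) : Bool :=
  match msg with
  | [] => false
  | word :: rest =>
    if word == spam_word then
      if count + 1 == 3 then true else checkSpamInner spam_word rest (count + 1)
    else checkSpamInner spam_word rest count

-- outer loop: 'for spam_word in spam_word_list: …; return False'
def checkSpamOuter (msg : List String) (spams : List String) : Bool :=
  match spams with
  | [] => false
  | s :: rest => if checkSpamInner s msg 0 then true else checkSpamOuter msg rest

def check_spam (msg_word_list : List String) : Bool :=
  checkSpamOuter msg_word_list spam_word_list

-- ===== PORT B =====
def check_spam_alt (msg_word_list : List String) : Bool :=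
  let counts := msg_word_list.foldl (fun d w => d.insert w (d.getD w 0 + 1)) (PySem.Dict.empty : PySem.Dict String Int)
  spam_word_list.any (fun w => decide (3 ≤ counts.getD w 0))

-- ===== PRECONDITION & SPEC =====
def Spec_check_spam (msg_word_list : List String) (out : Bool) : Prop := out = check_spam_alt msg_word_list
instance (msg_word_list : List String) (out : Bool) : Decidable (Spec_check_spam msg_word_list out) := by unfold Spec_check_spam; infer_instance

-- ===== CLAIM (what is proved, stated in full; the proofs are below) =====
def Claim_equal_check_spam : Prop := ∀ (msg_word_list : List String), Dom_check_spam msg_word_list → Spec_check_spam msg_word_list (check_spam msg_word_list)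

-- ===== LEMMAS AND PROOFS =====

theorem checkSpamInner_eq (spam : String) (msg : List String) (c : Int) (h : c < 3) :
    checkSpamInner spam msg c = decide (3 ≤ c + (msg.count spam : Int)) := by
  induction msg generalizing c with
  | nil => simp [checkSpamInner]; omega
  | cons w rest ih =>
    simp only [checkSpamInner]
    by_cases hw : w = spam
    · subst hw
      rw [List.count_cons_self]
      by_cases h3 : c + 1 = 3
      · simp [h3]
        have : (rest.count w : Int) ≥ 0 := by positivity
        omega
      · have hne : (c + 1 == (3:Int)) = false := by simp [h3]
        simp only [beq_self_eq_true, if_true, hne, Bool.false_eq_true, if_false]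
        rw [ih (c+1) (by omega)]
        simp only [decide_eq_decide]
        push_cast
        omega
    · have hb : (w == spam) = false := by simp [hw]
      simp only [hb, Bool.false_eq_true, if_false]
      rw [List.count_cons_of_ne (by simp [hw]), ih c h]

theorem any_ext {α : Type} (l : List α) (f g : α → Bool) (h : ∀ s ∈ l, f s = g s) :
    l.any f = l.any g := by
  induction l with
  | nil => rfl
  | cons x xs ih =>
    simp only [List.any_cons, h x (List.mem_cons_self), ih (fun s hs => h s (List.mem_cons_of_mem _ hs))]

theorem checkSpamOuter_eq (msg : List String) (spams : List String) :
    checkSpamOuter msg spams = spams.any (fun s => checkSpamInner s msg 0) := by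
  induction spams with
  | nil => rfl
  | cons s rest ih =>
    simp only [checkSpamOuter, ih, List.any_cons]
    split_ifs with h <;> simp [h]


-- ===== VERDICT (by name: the statement is the Claim_ definition above) =====
theorem check_spam_spec : Claim_equal_check_spam := by
  intro msg _
  unfold Spec_check_spam check_spam check_spam_alt
  rw [checkSpamOuter_eq]
  refine any_ext _ _ _ (fun s _ => ?_)
  rw [checkSpamInner_eq s msg 0 (by norm_num)]
  rw [PySem.Dict.getD_foldl_insert_add_one, PySem.Dict.getD_empty, zero_add]
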